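-- pv_equiv track=rewrite | github.com/joshanashakya/dissertation | workspace/dataset/java-python/GeeksForGeeks/3272/A/2.py | countIntegers
-- ===== SOURCE A (Python) =====
-- def power(a, n):
--
--     if n == 0:
--         return 1
--
--     p = power(a, n // 2)
--     p = p * p
--
--     if n & 1:
--         p = p * a
--
--     return p
--
-- def countIntegers(l, r):
--
--     ans, i = 0, 1
--     v = power(2, i)
--
--     while v <= r:
--
--         while v <= r:
--
--             if v >= l:
--                 ans += 1
--
--             v = v * 3
--
--         i += 1
--         v = power(2, i)
--
--     if l == 1:
--         ans += 1
--
--     return ans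
-- ===== SOURCE B (Python) =====
-- def _count_le(p3, x):
--     # binary search: number of entries of the sorted list p3 that are <= x
--     lo, hi = 0, len(p3)
--     while lo < hi:
--         mid = (lo + hi) // 2
--         if p3[mid] <= x:
--             lo = mid + 1
--         else:
--             hi = mid
--     return lo
--
-- def countIntegers(l, r):
--     # all powers of three <= r, ascending
--     p3 = []
--     t = 1
--     while t <= r:
--         p3.append(t)
--         t *= 3
--     ans = 0
--     p2 = 2
--     while p2 <= r:
--         hi = r // p2           # largest k with p2*k <= r
--         lo = -((-l) // p2)     # ceil(l / p2): smallest k with p2*k >= l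
--         cnt = _count_le(p3, hi) - _count_le(p3, lo - 1)
--         if cnt > 0:            # range may be empty (l > r)
--             ans += cnt
--         p2 *= 2
--     if l == 1:
--         ans += 1
--     return ans
-- ===== Notes on version B (the rewrite author's own statement) =====
-- stated objective: alternative
-- what changed: Replaces A's nested geometric rescan (for each power of two, walk every multiple by powers of three and test both bounds) with a precomputed sorted table of the powers of three and, per power of two, a binary-search range count using floor/ceil division bounds.
import Mathlib
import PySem

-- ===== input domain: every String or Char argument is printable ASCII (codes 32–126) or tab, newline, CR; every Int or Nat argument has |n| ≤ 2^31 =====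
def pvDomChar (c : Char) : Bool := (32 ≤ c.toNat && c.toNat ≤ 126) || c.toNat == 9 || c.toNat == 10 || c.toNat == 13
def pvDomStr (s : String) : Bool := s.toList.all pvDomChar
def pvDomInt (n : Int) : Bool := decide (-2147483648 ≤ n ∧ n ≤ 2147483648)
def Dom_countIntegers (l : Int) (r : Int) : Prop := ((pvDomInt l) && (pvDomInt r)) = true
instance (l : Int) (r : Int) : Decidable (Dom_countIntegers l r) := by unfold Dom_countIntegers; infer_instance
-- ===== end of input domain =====

-- B replaces A's rescan of every product 2^i*3^j by a precomputed sorted table of powers of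
-- three plus, per power of two, a binary-search range count (alternative algorithm, same
-- logarithmic cost class; equality of the return values is proved below).

-- ===== PORT A =====
-- power(a, n); A only calls it with n ≥ 1 (n ≤ 0 is folded into Python's n == 0 base case;
-- Python would not terminate on n < 0, which is unreachable from countIntegers)
def powerA (a : Int) (n : Int) : Int :=
  if n ≤ 0 then 1
  else
    let p := powerA a (PySem.Int.floordiv n 2)
    let p := p * p
    if PySem.Int.band n 1 ≠ 0 then p * a else p
termination_by n.toNat
decreasing_by
  have h2 : PySem.Int.floordiv n 2 = n / 2 := PySem.Int.floordiv_eq_ediv_of_pos (by norm_num)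
  rw [h2]; omega

-- the inner 'while v <= r' loop of A (v ≥ 1 always holds at every call site)
def innerA (l r : Int) (v ans : Int) (hv : 1 ≤ v) : Int :=
  if v ≤ r then
    innerA l r (v * 3) (if l ≤ v then ans + 1 else ans) (by omega)
  else ans
termination_by (r + 1 - v).toNat
decreasing_by all_goals omega

-- closed form of power, needed for the outer loop's termination (i < 2^i)
theorem powerA_eq (a : Int) (n : Int) : powerA a n = a ^ n.toNat := by
  rw [powerA]
  split
  · next h => rw [Int.toNat_of_nonpos h]; simp
  · next h =>
    have hn : 1 ≤ n := by omega
    have h2 : PySem.Int.floordiv n 2 = n / 2 := PySem.Int.floordiv_eq_ediv_of_pos (by norm_num)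
    have ih := powerA_eq a (PySem.Int.floordiv n 2)
    rw [ih, h2]
    have hk : (n / 2).toNat = n.toNat / 2 := by omega
    rw [hk]
    have hm : PySem.Int.mod n 2 = n % 2 := PySem.Int.mod_eq_emod_of_pos (by norm_num)
    simp only [PySem.Int.band_one, hm]
    by_cases hodd : n % 2 = 0
    · rw [if_neg (by omega)]
      rw [← pow_add]
      congr 1
      omega
    · rw [if_pos (by omega)]
      rw [← pow_add, ← pow_succ]
      congr 1
      omega
termination_by n.toNat
decreasing_by
  have h2 : PySem.Int.floordiv n 2 = n / 2 := PySem.Int.floordiv_eq_ediv_of_pos (by norm_num)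
  rw [h2]; omega

-- the outer 'while v <= r' loop of A, recomputing v = power(2, i) each round
def outerA (l r : Int) (i ans : Int) (hi : 1 ≤ i) : Int :=
  if h : powerA 2 i ≤ r then
    outerA l r (i + 1)
      (innerA l r (powerA 2 i) ans (by rw [powerA_eq]; exact one_le_pow₀ (by norm_num)))
      (by omega)
  else ans
termination_by (r + 1 - i).toNat
decreasing_by
  have hlt : i.toNat < 2 ^ i.toNat := Nat.lt_two_pow_self
  rw [powerA_eq] at h
  have : (i.toNat : Int) < (2 ^ i.toNat : Nat) := by exact_mod_cast hlt
  push_cast at this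
  omega

def countIntegers (l : Int) (r : Int) : Int :=
  let ans := outerA l r 1 0 (by norm_num)
  if l = 1 then ans + 1 else ans

-- ===== PORT B =====
-- binary-search loop of _count_le
def countLeLoop (p3 : List Int) (x lo hi : Int) : Int :=
  if h : lo < hi then
    let mid := PySem.Int.floordiv (lo + hi) 2
    if (PySem.List.pyGet? p3 mid).getD 0 ≤ x then countLeLoop p3 x (mid + 1) hi
    else countLeLoop p3 x lo mid
  else lo
termination_by (hi - lo).toNat
decreasing_by
  · have _hge := (PySem.Int.le_floordiv_iff_mul_le (a := lo + hi) (b := 2) (q := lo) (by norm_num)).2 (by omega)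
    have := (PySem.Int.floordiv_lt_iff_lt_mul (a := lo + hi) (b := 2) (q := hi) (by norm_num)).2 (by omega)
    omega
  · have _hge := (PySem.Int.le_floordiv_iff_mul_le (a := lo + hi) (b := 2) (q := lo) (by norm_num)).2 (by omega)
    have := (PySem.Int.floordiv_lt_iff_lt_mul (a := lo + hi) (b := 2) (q := hi) (by norm_num)).2 (by omega)
    omega

def countLe (p3 : List Int) (x : Int) : Int := countLeLoop p3 x 0 (p3.length : Int)

-- the 'while t <= r: p3.append(t); t *= 3' builder
def build3 (r : Int) (t : Int) (acc : List Int) (ht : 1 ≤ t) : List Int :=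
  if t ≤ r then build3 r (t * 3) (acc ++ [t]) (by omega) else acc
termination_by (r + 1 - t).toNat
decreasing_by omega

-- the 'while p2 <= r' loop of B
def outerB (l r : Int) (p3 : List Int) (p2 ans : Int) (h2 : 1 ≤ p2) : Int :=
  if p2 ≤ r then
    let hi := PySem.Int.floordiv r p2
    let lo := -(PySem.Int.floordiv (-l) p2)
    let cnt := countLe p3 hi - countLe p3 (lo - 1)
    outerB l r p3 (p2 * 2) (if 0 < cnt then ans + cnt else ans) (by omega)
  else ans
termination_by (r + 1 - p2).toNat
decreasing_by omega

def countIntegers_alt (l : Int) (r : Int) : Int :=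
  let p3 := build3 r 1 [] (by norm_num)
  let ans := outerB l r p3 2 0 (by norm_num)
  if l = 1 then ans + 1 else ans

-- ===== PRECONDITION & SPEC =====
def Spec_countIntegers (l : Int) (r : Int) (out : Int) : Prop := out = countIntegers_alt l r
instance (l : Int) (r : Int) (out : Int) : Decidable (Spec_countIntegers l r out) := by unfold Spec_countIntegers; infer_instance

-- ===== CLAIM (what is proved, stated in full; the proofs are below) =====
def Claim_equal_countIntegers : Prop := ∀ (l : Int) (r : Int), Dom_countIntegers l r → Spec_countIntegers l r (countIntegers l r)

-- ===== LEMMAS AND PROOFS =====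

-- accumulator lemma for A's inner loop
theorem innerA_acc (l r v ans : Int) (hv : 1 ≤ v) :
    innerA l r v ans hv = ans + innerA l r v 0 hv := by
  conv_lhs => rw [innerA]
  conv_rhs => rw [innerA]
  split
  · next h =>
    rw [innerA_acc l r (v * 3) (if l ≤ v then ans + 1 else ans) (by omega),
        innerA_acc l r (v * 3) (if l ≤ v then 0 + 1 else 0) (by omega)]
    split_ifs <;> ring
  · ring
termination_by (r + 1 - v).toNat
decreasing_by all_goals omega

-- accumulator lemma for B's power-of-three builder
theorem build3_acc (r t : Int) (acc : List Int) (ht : 1 ≤ t) :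
    build3 r t acc ht = acc ++ build3 r t [] ht := by
  conv_lhs => rw [build3]
  conv_rhs => rw [build3]
  split
  · next h =>
    rw [build3_acc r (t * 3) (acc ++ [t]) (by omega),
        build3_acc r (t * 3) ([] ++ [t]) (by omega)]
    simp
  · simp
termination_by (r + 1 - t).toNat
decreasing_by all_goals omega

theorem build3_nil (r t : Int) (ht : 1 ≤ t) :
    build3 r t [] ht = if t ≤ r then t :: build3 r (t * 3) [] (by omega) else [] := by
  conv_lhs => rw [build3]
  split
  · next h => rw [build3_acc]; simp
  · rfl

-- every entry of build3 r t [] is ≥ t, and the list is sorted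
theorem build3_bounds (r t : Int) (ht : 1 ≤ t) :
    (∀ u ∈ build3 r t [] ht, t ≤ u) ∧ (build3 r t [] ht).Pairwise (· ≤ ·) := by
  rw [build3_nil]
  split
  · next h =>
    obtain ⟨hmem, hpw⟩ := build3_bounds r (t * 3) (by omega)
    refine ⟨?_, ?_⟩
    · intro u hu
      rcases List.mem_cons.1 hu with h1 | h1
      · omega
      · have := hmem u h1; omega
    · exact List.pairwise_cons.2 ⟨fun u hu => by have := hmem u hu; omega, hpw⟩
  · simp
termination_by (r + 1 - t).toNat
decreasing_by omega

-- if the first k entries are ≤ x and the rest are > x, the filter has length k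
theorem filter_length_split (x : Int) :
    ∀ (p3 : List Int) (k : Nat), k ≤ p3.length →
    (∀ i : Nat, i < k → ∀ h : i < p3.length, p3[i] ≤ x) →
    (∀ i : Nat, k ≤ i → ∀ h : i < p3.length, x < p3[i]) →
    (p3.filter (fun u => decide (u ≤ x))).length = k := by
  intro p3
  induction p3 with
  | nil => intro k hk _ _; simp at hk ⊢; omega
  | cons a t ih =>
    intro k hk h1 h2
    cases k with
    | zero =>
      have : ∀ u ∈ a :: t, ¬ (decide (u ≤ x) = true) := by
        intro u hu
        rw [List.mem_iff_getElem] at hu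
        obtain ⟨i, hi, rfl⟩ := hu
        simpa using h2 i (Nat.zero_le _) hi
      rw [List.filter_eq_nil_iff.2 this]; rfl
    | succ j =>
      have ha : a ≤ x := h1 0 (Nat.succ_pos _) (by simp)
      rw [List.filter_cons_of_pos (by simpa using ha)]
      have := ih j (by simpa using hk)
        (fun i hi h => by simpa using h1 (i + 1) (by omega) (by simpa using h))
        (fun i hi h => by simpa using h2 (i + 1) (by omega) (by simpa using h))
      simp [this]

-- binary-search invariant: countLeLoop returns the number of entries ≤ x
theorem countLeLoop_eq (p3 : List Int) (x : Int) (hs : p3.Pairwise (· ≤ ·)) (lo hi : Int)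
    (hlo : 0 ≤ lo) (hlh : lo ≤ hi) (hhi : hi ≤ (p3.length : Int))
    (hpre : ∀ i : Nat, (i : Int) < lo → ∀ h : i < p3.length, p3[i] ≤ x)
    (hpost : ∀ i : Nat, hi ≤ (i : Int) → ∀ h : i < p3.length, x < p3[i]) :
    countLeLoop p3 x lo hi = ((p3.filter (fun u => decide (u ≤ x))).length : Int) := by
  rw [countLeLoop]
  split
  · next h =>
    show (if (PySem.List.pyGet? p3 (PySem.Int.floordiv (lo + hi) 2)).getD 0 ≤ x then
            countLeLoop p3 x (PySem.Int.floordiv (lo + hi) 2 + 1) hi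
          else countLeLoop p3 x lo (PySem.Int.floordiv (lo + hi) 2))
        = ((p3.filter (fun u => decide (u ≤ x))).length : Int)
    have hmid1 := (PySem.Int.le_floordiv_iff_mul_le (a := lo + hi) (b := 2) (q := lo) (by norm_num)).2 (by omega)
    have hmid2 := (PySem.Int.floordiv_lt_iff_lt_mul (a := lo + hi) (b := 2) (q := hi) (by norm_num)).2 (by omega)
    set mid := PySem.Int.floordiv (lo + hi) 2 with hmiddef
    have hmnn : 0 ≤ mid := by omega
    have hmlen : mid < (p3.length : Int) := by omega
    have hget : (PySem.List.pyGet? p3 mid).getD 0 = p3[mid.toNat]'(by omega) := by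
      rw [PySem.List.pyGet?_eq_some_getElem p3 hmnn hmlen]; rfl
    have hs' := List.pairwise_iff_getElem.1 hs
    split
    · next hle =>
      refine countLeLoop_eq p3 x hs (mid + 1) hi (by omega) (by omega) hhi ?_ hpost
      intro i hi' hilen
      rcases Nat.lt_or_ge i mid.toNat with hc | hc
      · calc p3[i] ≤ p3[mid.toNat]'(by omega) := hs' i mid.toNat _ _ hc
          _ ≤ x := by rw [← hget]; exact hle
      · have : i = mid.toNat := by omega
        subst this
        rw [← hget]; exact hle
    · next hgt =>
      refine countLeLoop_eq p3 x hs lo mid hlo (by omega) (by omega) hpre ?_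
      intro i hi' hilen
      rcases Nat.lt_or_ge mid.toNat i with hc | hc
      · calc x < p3[mid.toNat]'(by omega) := by rw [← hget]; omega
          _ ≤ p3[i] := hs' mid.toNat i _ _ hc
      · have : i = mid.toNat := by omega
        subst this
        rw [← hget]; omega
  · next h =>
    have hlohi : lo = hi := by omega
    subst hlohi
    rw [filter_length_split x p3 lo.toNat (by omega)
      (fun i hi h => hpre i (by omega) h) (fun i hi h => hpost i (by omega) h)]
    omega
termination_by (hi - lo).toNat
decreasing_by all_goals omega

theorem countLe_eq (p3 : List Int) (x : Int) (hs : p3.Pairwise (· ≤ ·)) :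
    countLe p3 x = ((p3.filter (fun u => decide (u ≤ x))).length : Int) := by
  unfold countLe
  exact countLeLoop_eq p3 x hs 0 p3.length (le_refl 0) (by positivity) (le_refl _)
    (fun i hi h => by omega) (fun i hi h => by omega)

-- A's inner loop starting at v*t counts exactly the entries u of build3 r t [] with l ≤ v*u ≤ r
theorem inner_eq_filter (l r : Int) (t v : Int) (ht : 1 ≤ t) (hv : 1 ≤ v) (hvt : 1 ≤ v * t) :
    innerA l r (v * t) 0 hvt =
      (((build3 r t [] ht).filter (fun u => decide (l ≤ v * u) && decide (v * u ≤ r))).length : Int) := by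
  have hvt' : t ≤ v * t := by nlinarith
  rw [build3_nil]
  conv_lhs => rw [innerA]
  by_cases htr : t ≤ r
  · rw [if_pos htr]
    have hvt3 : 1 ≤ v * (t * 3) := by nlinarith
    have ih := inner_eq_filter l r (t * 3) v (by omega) hv hvt3
    rw [List.filter_cons]
    by_cases hvtr : v * t ≤ r
    · rw [if_pos hvtr]
      rw [innerA_acc]
      have harg : innerA l r (v * t * 3) 0 (by omega) = innerA l r (v * (t * 3)) 0 hvt3 := by
        congr 1; ring
      rw [harg, ih]
      have hcond : (decide (l ≤ v * t) && decide (v * t ≤ r)) = decide (l ≤ v * t) := by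
        simp [hvtr]
      rw [hcond]
      by_cases hl : l ≤ v * t
      · rw [if_pos hl, if_pos (by simpa using hl), List.length_cons]
        push_cast
        ring
      · rw [if_neg hl, if_neg (by simpa using hl)]
        ring
    · rw [if_neg hvtr]
      -- v*t > r: head fails, and the tail counts innerA at v*(t*3), which exits immediately
      have hcond : (decide (l ≤ v * t) && decide (v * t ≤ r)) = false := by
        simp; intro _; omega
      rw [hcond]
      simp only [Bool.false_eq_true, if_false]
      rw [← ih]
      conv_rhs => rw [innerA]
      rw [if_neg (by nlinarith)]
  · rw [if_neg htr]
    rw [if_neg (by omega)]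
    simp
termination_by (r + 1 - t).toNat
decreasing_by all_goals omega

-- window identity: #(≤hi) - #(≤lo-1) = #(lo ≤ · ≤ hi) - #(· ≤ lo-1 ∧ hi < ·), elementwise
theorem count_window (lo hi : Int) : ∀ (P : List Int),
    ((P.filter (fun u => decide (u ≤ hi))).length : Int)
      - ((P.filter (fun u => decide (u ≤ lo - 1))).length : Int)
    = ((P.filter (fun u => decide (lo ≤ u) && decide (u ≤ hi))).length : Int)
      - ((P.filter (fun u => decide (u ≤ lo - 1) && decide (hi < u))).length : Int) := by
  intro P
  induction P with
  | nil => simp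
  | cons a t ih =>
    simp only [List.filter_cons]
    by_cases h1 : a ≤ hi <;> by_cases h2 : a ≤ lo - 1 <;> by_cases h3 : lo ≤ a <;>
      simp [h1, h2, h3, show (hi < a) ↔ ¬ (a ≤ hi) by omega] at ih ⊢ <;> omega

-- B's per-p2 contribution equals A's inner count at v = p2
theorem step_eq (l r p2 : Int) (h2 : 1 ≤ p2) (hone : (1:Int) ≤ 1) (hp : 1 ≤ p2) :
    (if 0 < countLe (build3 r 1 [] hone) (PySem.Int.floordiv r p2)
            - countLe (build3 r 1 [] hone) (-(PySem.Int.floordiv (-l) p2) - 1)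
     then countLe (build3 r 1 [] hone) (PySem.Int.floordiv r p2)
            - countLe (build3 r 1 [] hone) (-(PySem.Int.floordiv (-l) p2) - 1)
     else 0) = innerA l r p2 0 hp := by
  obtain ⟨hmem, hsorted⟩ := build3_bounds r 1 hone
  set P := build3 r 1 [] hone with hP
  set hi := PySem.Int.floordiv r p2 with hhi
  set lo := -(PySem.Int.floordiv (-l) p2) with hlo
  have hiff1 : ∀ u : Int, (u ≤ hi) ↔ (p2 * u ≤ r) := by
    intro u
    rw [hhi, show (u ≤ PySem.Int.floordiv r p2) ↔ u * p2 ≤ r from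
      PySem.Int.le_floordiv_iff_mul_le (by omega)]
    constructor <;> intro h <;> nlinarith
  have hiff2 : ∀ u : Int, (lo ≤ u) ↔ (l ≤ p2 * u) := by
    intro u
    rw [hlo, show (-(PySem.Int.floordiv (-l) p2) ≤ u) ↔ (-u ≤ PySem.Int.floordiv (-l) p2) by omega,
      show (-u ≤ PySem.Int.floordiv (-l) p2) ↔ (-u) * p2 ≤ -l from
        PySem.Int.le_floordiv_iff_mul_le (by omega)]
    constructor <;> intro h <;> nlinarith
  have hinner : innerA l r p2 0 hp =
      ((P.filter (fun u => decide (l ≤ p2 * u) && decide (p2 * u ≤ r))).length : Int) := by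
    have harg : innerA l r p2 0 hp = innerA l r (p2 * 1) 0 (by omega) := by congr 1; ring
    rw [harg]
    exact inner_eq_filter l r 1 p2 hone (by omega) (by omega)
  have hC : (P.filter (fun u => decide (lo ≤ u) && decide (u ≤ hi))) =
      (P.filter (fun u => decide (l ≤ p2 * u) && decide (p2 * u ≤ r))) := by
    apply List.filter_congr
    intro u _
    simp only [hiff1 u, hiff2 u]
  have hwin := count_window lo hi P
  rw [countLe_eq P hi hsorted, countLe_eq P (lo - 1) hsorted]
  rcases le_or_gt lo (hi + 1) with hcase | hcase
  · have hD : (P.filter (fun u => decide (u ≤ lo - 1) && decide (hi < u))) = [] := by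
      apply List.filter_eq_nil_iff.2
      intro u _
      simp; omega
    rw [hD] at hwin
    simp only [List.length_nil, Nat.cast_zero, sub_zero] at hwin
    rw [hwin, hC, ← hinner]
    split_ifs with hpos
    · rfl
    · rw [hinner] at hpos ⊢
      have hnn : (0 : Int) ≤ ((P.filter (fun u => decide (l ≤ p2 * u) && decide (p2 * u ≤ r))).length : Int) := by positivity
      omega
  · have hC0 : (P.filter (fun u => decide (lo ≤ u) && decide (u ≤ hi))) = [] := by
      apply List.filter_eq_nil_iff.2
      intro u _
      simp; omega
    have hC1 : (P.filter (fun u => decide (l ≤ p2 * u) && decide (p2 * u ≤ r))) = [] := by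
      rw [← hC]; exact hC0
    rw [hC0] at hwin
    simp only [List.length_nil, Nat.cast_zero, zero_sub] at hwin
    have hD : (0 : Int) ≤ ((P.filter (fun u => decide (u ≤ lo - 1) && decide (hi < u))).length : Int) := by
      positivity
    rw [if_neg (by omega)]
    rw [hinner, hC1]
    simp

-- outer loops agree, tracking p2 = powerA 2 i
theorem outer_eq (l r : Int) (i ans : Int) (hi1 : 1 ≤ i) (hone : (1:Int) ≤ 1) (hp : 1 ≤ powerA 2 i) :
    outerA l r i ans hi1 = outerB l r (build3 r 1 [] hone) (powerA 2 i) ans hp := by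
  have outerB_congr : ∀ (p q : Int) (hpq : p = q) (ha : 1 ≤ p) (hb : 1 ≤ q) (A : Int),
      outerB l r (build3 r 1 [] hone) p A ha = outerB l r (build3 r 1 [] hone) q A hb := by
    intro p q hpq ha hb A
    subst hpq
    rfl
  conv_lhs => rw [outerA]
  split
  · next h =>
    have hnext : powerA 2 (i + 1) = powerA 2 i * 2 := by
      rw [powerA_eq, powerA_eq]
      have : (i + 1).toNat = i.toNat + 1 := by omega
      rw [this, pow_succ]
    have hp2 : 1 ≤ powerA 2 i * 2 := by omega
    have hp' : 1 ≤ powerA 2 (i + 1) := by rw [hnext]; omega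
    have hir : i < r := by
      have hlt : i.toNat < 2 ^ i.toNat := Nat.lt_two_pow_self
      have h' := h
      rw [powerA_eq] at h'
      have hcast : (i.toNat : Int) < ((2 ^ i.toNat : Nat) : Int) := by exact_mod_cast hlt
      push_cast at hcast
      omega
    have ih := outer_eq l r (i + 1)
      (innerA l r (powerA 2 i) ans (by rw [powerA_eq]; exact one_le_pow₀ (by norm_num)))
      (by omega) hone hp'
    rw [ih, outerB_congr _ _ hnext hp' hp2 _]
    conv_rhs => rw [outerB]
    rw [if_pos h]
    show _ = outerB l r (build3 r 1 [] hone) (powerA 2 i * 2)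
      (if 0 < countLe (build3 r 1 [] hone) (PySem.Int.floordiv r (powerA 2 i))
              - countLe (build3 r 1 [] hone) (-(PySem.Int.floordiv (-l) (powerA 2 i)) - 1)
       then ans + (countLe (build3 r 1 [] hone) (PySem.Int.floordiv r (powerA 2 i))
              - countLe (build3 r 1 [] hone) (-(PySem.Int.floordiv (-l) (powerA 2 i)) - 1))
       else ans) (by omega)
    have hans : innerA l r (powerA 2 i) ans (by rw [powerA_eq]; exact one_le_pow₀ (by norm_num)) =
        (if 0 < countLe (build3 r 1 [] hone) (PySem.Int.floordiv r (powerA 2 i))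
              - countLe (build3 r 1 [] hone) (-(PySem.Int.floordiv (-l) (powerA 2 i)) - 1)
         then ans + (countLe (build3 r 1 [] hone) (PySem.Int.floordiv r (powerA 2 i))
              - countLe (build3 r 1 [] hone) (-(PySem.Int.floordiv (-l) (powerA 2 i)) - 1))
         else ans) := by
      rw [innerA_acc]
      rw [← step_eq l r (powerA 2 i) hp hone hp]
      split_ifs <;> ring
    rw [hans]
  · next h => rw [outerB, if_neg h]
termination_by (r + 1 - i).toNat
decreasing_by all_goals omega

-- ===== VERDICT (by name: the statement is the Claim_ definition above) =====
theorem outerB_arg_congr (l r : Int) (P : List Int) (p q A : Int) (hpq : p = q)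
    (h1 : 1 ≤ p) (h2 : 1 ≤ q) : outerB l r P p A h1 = outerB l r P q A h2 := by
  subst hpq; rfl

theorem countIntegers_spec : Claim_equal_countIntegers := by
  intro l r _
  unfold Spec_countIntegers countIntegers countIntegers_alt
  have h2 : powerA 2 1 = 2 := by rw [powerA_eq]; rfl
  have hmain := (outer_eq l r 1 0 (by norm_num) (by norm_num) (by rw [h2]; norm_num)).trans
    (outerB_arg_congr l r (build3 r 1 [] (by norm_num)) (powerA 2 1) 2 0 h2
      (by rw [h2]; norm_num) (by norm_num))
  show (if l = 1 then outerA l r 1 0 (by norm_num) + 1 else outerA l r 1 0 (by norm_num)) =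
    (if l = 1 then outerB l r (build3 r 1 [] (by norm_num)) 2 0 (by norm_num) + 1
     else outerB l r (build3 r 1 [] (by norm_num)) 2 0 (by norm_num))
  rw [hmain]
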